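-- pv_equiv track=rewrite | github.com/yanniedog/OrderSkew | tools/novel_indicator/backend/app/research/runner.py | _infer_step_ms
-- ===== SOURCE A (Python) =====
-- def _infer_step_ms(timestamps: list[int]) -> int:
--     if len(timestamps) < 3:
--         return 60_000
--     diffs = [b - a for a, b in zip(timestamps[:-1], timestamps[1:]) if b > a]
--     if not diffs:
--         return 60_000
--     diffs.sort()
--     return diffs[len(diffs) // 2]
-- ===== SOURCE B (Python) =====
-- def _select(xs, k):
--     # rank-k element (0-based, ascending) via three-way-partition quickselect
--     p = xs[0]
--     lt = [x for x in xs if x < p]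
--     if k < len(lt):
--         return _select(lt, k)
--     eq = sum(1 for x in xs if x == p)
--     if k < len(lt) + eq:
--         return p
--     return _select([x for x in xs if x > p], k - len(lt) - eq)
--
--
-- def _infer_step_ms(timestamps: list[int]) -> int:
--     diffs = [b - a for a, b in zip(timestamps, timestamps[1:]) if b > a]
--     if len(timestamps) < 3 or not diffs:
--         return 60_000
--     return _select(diffs, len(diffs) // 2)
-- ===== Notes on version B (the rewrite author's own statement) =====
-- stated objective: alternative
-- what changed: Replaces A's full sort of the positive consecutive differences by a three-way-partition quickselect that recurses only into the side containing rank len(diffs)//2.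
import Mathlib
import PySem

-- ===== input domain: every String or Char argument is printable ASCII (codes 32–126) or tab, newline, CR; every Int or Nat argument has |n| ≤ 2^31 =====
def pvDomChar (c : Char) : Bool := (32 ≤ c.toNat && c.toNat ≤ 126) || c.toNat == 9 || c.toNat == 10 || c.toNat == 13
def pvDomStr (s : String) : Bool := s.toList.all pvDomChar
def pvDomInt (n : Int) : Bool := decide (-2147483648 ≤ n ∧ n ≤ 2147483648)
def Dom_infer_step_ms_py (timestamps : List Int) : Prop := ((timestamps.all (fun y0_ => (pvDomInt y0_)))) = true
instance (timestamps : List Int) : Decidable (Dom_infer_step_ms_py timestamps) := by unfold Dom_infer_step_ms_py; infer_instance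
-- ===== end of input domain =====

-- B replaces A's full sort of the diffs by a three-way-partition quickselect for rank len(diffs)//2 (objective: alternative); the diff-building filter is unchanged.

-- ===== PORT A =====
def infer_step_ms_py (timestamps : List Int) : Int :=
  if timestamps.length < 3 then 60000
  else
    -- diffs = [b - a for a, b in zip(timestamps[:-1], timestamps[1:]) if b > a]
    let diffs := ((PySem.List.slice timestamps none (some (-1))).zip
        (PySem.List.slice timestamps (some 1) none)).filterMap
        (fun ab => if ab.1 < ab.2 then some (ab.2 - ab.1) else none)
    if diffs = [] then 60000
    else
      -- diffs.sort(); return diffs[len(diffs) // 2]  (index always in range, so getD's default is never used)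
      PySem.List.pyGetD (PySem.List.sorted diffs (fun x => x) false)
        (PySem.Int.floordiv (diffs.length : Int) 2) 0

-- ===== PORT B =====
-- _select(xs, k): rank-k element via three-way-partition quickselect; only called with 0 ≤ k < len(xs),
-- so the [] case (where Python's xs[0] would raise) is unreachable.
def pySelect : List Int → Int → Int
  | [], _ => 0
  | p :: t, k =>
    let lt := (p :: t).filter (fun x => decide (x < p))
    if k < (lt.length : Int) then pySelect lt k
    else
      let eq : Int := ((p :: t).countP (fun x => x == p) : Int)
      if k < (lt.length : Int) + eq then p
      else pySelect ((p :: t).filter (fun x => decide (p < x))) (k - lt.length - eq)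
termination_by xs _ => xs.length
decreasing_by
  · simp only [List.filter_cons, decide_eq_true_eq, lt_irrefl, if_false]
    exact Nat.lt_succ_of_le (List.length_filter_le _ _)
  · simp only [List.filter_cons, decide_eq_true_eq, lt_irrefl, if_false]
    exact Nat.lt_succ_of_le (List.length_filter_le _ _)

def infer_step_ms_py_alt (timestamps : List Int) : Int :=
  -- diffs = [b - a for a, b in zip(timestamps, timestamps[1:]) if b > a]  (zip stops at the shorter list)
  let diffs := (timestamps.zip (PySem.List.slice timestamps (some 1) none)).filterMap
      (fun ab => if ab.1 < ab.2 then some (ab.2 - ab.1) else none)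
  if timestamps.length < 3 ∨ diffs = [] then 60000
  else pySelect diffs (PySem.Int.floordiv (diffs.length : Int) 2)

-- ===== PRECONDITION & SPEC =====
def Spec_infer_step_ms_py (timestamps : List Int) (out : Int) : Prop := out = infer_step_ms_py_alt timestamps
instance (timestamps : List Int) (out : Int) : Decidable (Spec_infer_step_ms_py timestamps out) := by unfold Spec_infer_step_ms_py; infer_instance

-- ===== CLAIM (what is proved, stated in full; the proofs are below) =====
def Claim_equal_infer_step_ms_py : Prop := ∀ (timestamps : List Int), Dom_infer_step_ms_py timestamps → Spec_infer_step_ms_py timestamps (infer_step_ms_py timestamps)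

-- ===== LEMMAS AND PROOFS =====

-- all-equal lists are trivially sorted
lemma pairwise_le_of_all_eq (p : Int) : ∀ E : List Int, (∀ x ∈ E, x = p) → E.Pairwise (fun a b => a ≤ b)
  | [], _ => List.Pairwise.nil
  | a :: t, h => by
    refine List.Pairwise.cons ?_ (pairwise_le_of_all_eq p t fun x hx => h x (List.mem_cons_of_mem a hx))
    intro b hb
    rw [h a (List.mem_cons_self), h b (List.mem_cons_of_mem a hb)]

-- the three-way partition of xs at pivot p is a permutation of xs
lemma perm_part (p : Int) : ∀ xs : List Int,
    (xs.filter (fun x => decide (x < p)) ++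
      (xs.filter (fun x => x == p) ++ xs.filter (fun x => decide (p < x)))).Perm xs := by
  intro xs
  induction xs with
  | nil => simp
  | cons a t ih =>
    rcases lt_trichotomy a p with h | h | h
    · have h1 : (a == p) = false := by simp [h.ne]
      have h2 : ¬ (p < a) := not_lt.mpr h.le
      simp only [List.filter_cons, h, decide_true, if_true, h1, h2, decide_false, if_false,
        Bool.false_eq_true, List.cons_append]
      exact ih.cons a
    · subst h
      simp only [List.filter_cons, lt_irrefl, decide_false, if_false, beq_self_eq_true,
        if_true, Bool.false_eq_true]
      exact (List.perm_middle).trans (ih.cons a)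
    · have h1 : (a == p) = false := by simp [h.ne']
      have h2 : ¬ (a < p) := not_lt.mpr h.le
      simp only [List.filter_cons, h, h1, h2, decide_true, decide_false, if_true, if_false,
        Bool.false_eq_true]
      rw [← List.append_assoc]
      exact List.perm_middle.trans ((List.append_assoc _ _ _ ▸ ih).cons a)

-- sorted(xs) splits at pivot p into sorted(<p) ++ (=p) ++ sorted(>p)
lemma sorted_part (p : Int) (xs : List Int) :
    PySem.List.sorted xs (fun x => x) false
      = PySem.List.sorted (xs.filter (fun x => decide (x < p))) (fun x => x) false ++
          (xs.filter (fun x => x == p) ++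
           PySem.List.sorted (xs.filter (fun x => decide (p < x))) (fun x => x) false) := by
  apply PySem.List.sorted_id_eq_of_perm_of_pairwise
  · exact ((PySem.List.sorted_perm _ _ _).append
      ((List.Perm.refl _).append (PySem.List.sorted_perm _ _ _))).trans (perm_part p xs)
  · have hlt : ∀ x ∈ PySem.List.sorted (xs.filter (fun x => decide (x < p))) (fun x => x) false,
        x < p := by
      intro x hx
      have := (PySem.List.mem_sorted _ _ _ _).mp hx
      simpa using (List.mem_filter.mp this).2
    have heq : ∀ x ∈ xs.filter (fun x => x == p), x = p := by
      intro x hx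
      simpa using (List.mem_filter.mp hx).2
    have hgt : ∀ x ∈ PySem.List.sorted (xs.filter (fun x => decide (p < x))) (fun x => x) false,
        p < x := by
      intro x hx
      have := (PySem.List.mem_sorted _ _ _ _).mp hx
      simpa using (List.mem_filter.mp this).2
    rw [List.pairwise_append]
    refine ⟨PySem.List.sorted_pairwise _ _, ?_, ?_⟩
    · rw [List.pairwise_append]
      refine ⟨pairwise_le_of_all_eq p _ heq, PySem.List.sorted_pairwise _ _, ?_⟩
      · intro a ha b hb
        rw [heq a ha]; exact (hgt b hb).le
    · intro a ha b hb
      rcases List.mem_append.mp hb with hb | hb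
      · rw [heq b hb]; exact (hlt a ha).le
      · exact (hlt a ha).le.trans (hgt b hb).le

-- quickselect computes sorted(xs)[k] (strong induction on the length bound n)
lemma select_eq : ∀ n : Nat, ∀ xs : List Int, xs.length ≤ n → ∀ k : Int, 0 ≤ k → k < xs.length →
    pySelect xs k = (PySem.List.sorted xs (fun x => x) false).getD k.toNat 0 := by
  intro n
  induction n with
  | zero =>
    intro xs hlen k hk0 hk
    exfalso; omega
  | succ n ih =>
    intro xs hlen k hk0 hk
    match xs with
    | [] => exfalso; simp at hk; omega
    | p :: t =>
      have hA : ((p :: t).filter (fun x => decide (x < p))).length < (p :: t).length := by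
        simp only [List.filter_cons, decide_eq_true_eq, lt_irrefl, if_false]
        exact Nat.lt_succ_of_le (List.length_filter_le _ _)
      have hG : ((p :: t).filter (fun x => decide (p < x))).length < (p :: t).length := by
        simp only [List.filter_cons, decide_eq_true_eq, lt_irrefl, if_false]
        exact Nat.lt_succ_of_le (List.length_filter_le _ _)
      have hcount : (p :: t).countP (fun x => x == p)
          = ((p :: t).filter (fun x => x == p)).length :=
        List.countP_eq_length_filter
      have hlensum : ((p :: t).filter (fun x => decide (x < p))).length +
          (((p :: t).filter (fun x => x == p)).length +
           ((p :: t).filter (fun x => decide (p < x))).length) = (p :: t).length := by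
        have h := (perm_part p (p :: t)).length_eq
        simp only [List.length_append] at h
        omega
      have heqp : ∀ x ∈ (p :: t).filter (fun x => x == p), x = p := by
        intro x hx; simpa using (List.mem_filter.mp hx).2
      rw [pySelect, sorted_part p (p :: t)]
      simp only [hcount]
      split_ifs with h1 h2
      · -- k < |lt| : recurse left; index falls in the first block
        rw [ih _ (by omega) k hk0 h1,
          List.getD_append _ _ _ _ (by rw [PySem.List.length_sorted]; omega)]
      · -- |lt| ≤ k < |lt| + |eq| : the pivot's block
        rw [List.getD_append_right _ _ _ _ (by simp only [PySem.List.length_sorted]; omega),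
          PySem.List.length_sorted,
          List.getD_append _ _ _ _ (by omega),
          List.getD_eq_getElem _ _ (by omega)]
        exact (heqp _ (List.getElem_mem _)).symm
      · -- recurse right; index falls in the last block
        have hk' : (0:Int) ≤ k - ((p :: t).filter (fun x => decide (x < p))).length -
            ((p :: t).filter (fun x => x == p)).length := by omega
        have hkG : k - ((p :: t).filter (fun x => decide (x < p))).length -
            ((p :: t).filter (fun x => x == p)).length <
            ((p :: t).filter (fun x => decide (p < x))).length := by
          omega
        rw [ih _ (by omega) _ hk' hkG,
          List.getD_append_right _ _ _ _ (by simp only [PySem.List.length_sorted]; omega),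
          List.getD_append_right _ _ _ _ (by simp only [PySem.List.length_sorted]; omega)]
        congr 1
        simp only [PySem.List.length_sorted]
        omega

-- zip truncates to the shorter list, so taking |ys| elements of xs first changes nothing
lemma zip_take_length {A B : Type} : ∀ (xs : List A) (ys : List B), (xs.take ys.length).zip ys = xs.zip ys
  | [], _ => by simp
  | _ :: _, [] => by simp
  | x :: xs, y :: ys => by simp [zip_take_length xs ys]

-- A's zip(timestamps[:-1], timestamps[1:]) pairs the same elements as B's zip(timestamps, timestamps[1:])
lemma zip_slice_eq (ts : List Int) :
    (PySem.List.slice ts none (some (-1))).zip (PySem.List.slice ts (some 1) none)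
      = ts.zip (PySem.List.slice ts (some 1) none) := by
  rw [PySem.List.slice_to_neg_one, PySem.List.slice_from_one, List.dropLast_eq_take,
    ← List.drop_one, ← zip_take_length ts (ts.drop 1), List.length_drop]

-- ===== VERDICT (by name: the statement is the Claim_ definition above) =====
theorem infer_step_ms_py_spec : Claim_equal_infer_step_ms_py := by
  intro timestamps _
  unfold Spec_infer_step_ms_py infer_step_ms_py infer_step_ms_py_alt
  rw [zip_slice_eq]
  set diffs := (timestamps.zip (PySem.List.slice timestamps (some 1) none)).filterMap
      (fun ab => if ab.1 < ab.2 then some (ab.2 - ab.1) else none) with hdiffs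
  by_cases h3 : timestamps.length < 3
  · simp [h3]
  · simp only [h3, if_false, false_or]
    by_cases hd : diffs = []
    · simp [hd]
    · simp only [hd, if_false]
      have hn : 0 < diffs.length := List.length_pos_iff.mpr hd
      have hfd : PySem.Int.floordiv (diffs.length : Int) 2 = ((diffs.length / 2 : Nat) : Int) := by
        exact_mod_cast PySem.Int.floordiv_natCast diffs.length 2
      rw [hfd, select_eq diffs.length diffs le_rfl _ (by positivity)
        (by exact_mod_cast Nat.div_lt_self hn (by norm_num)),
        PySem.List.pyGetD_natCast]
      congr 1
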